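-- pv_equiv track=rewrite | github.com/strawsyz/straw | small_projects/contest/signate/signate1.py | str_2_int_4_grade
-- ===== SOURCE A (Python) =====
-- def str_2_int_4_grade(grade: str):
--     grade_level_ = grade[0]
--     grade_no_ = int(grade[1])
--     grade_levels = ["A", "B", "C", "D", "E", "F"]
--     for idx, grade_level in enumerate(grade_levels):
--         if grade_level_ == grade_level:
--             return idx * 10 + grade_no_
--     return None
-- ===== SOURCE B (Python) =====
-- def str_2_int_4_grade(grade: str):
--     level = ord(grade[0]) - ord("A")
--     grade_no = int(grade[1])
--     if 0 <= level <= 5: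
--         return level * 10 + grade_no
--     return None
-- ===== Notes on version B (the rewrite author's own statement) =====
-- stated objective: simpler
-- what changed: Replaces the enumerate-scan over the list ["A".."F"] with a closed-form level = ord(grade[0]) - ord('A') and a range check; no list or loop.
import Mathlib
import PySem

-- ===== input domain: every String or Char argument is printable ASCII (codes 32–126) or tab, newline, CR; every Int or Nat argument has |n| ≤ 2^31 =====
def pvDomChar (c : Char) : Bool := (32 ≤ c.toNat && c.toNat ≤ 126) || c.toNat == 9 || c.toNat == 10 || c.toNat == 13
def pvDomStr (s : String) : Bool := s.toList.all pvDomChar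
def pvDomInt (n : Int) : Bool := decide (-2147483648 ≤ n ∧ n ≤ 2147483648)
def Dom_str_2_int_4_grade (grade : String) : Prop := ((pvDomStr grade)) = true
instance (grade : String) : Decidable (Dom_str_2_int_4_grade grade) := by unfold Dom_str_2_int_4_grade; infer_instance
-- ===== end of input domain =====

-- B replaces A's enumerate-scan over ["A".."F"] with the closed form ord(grade[0]) - ord('A') and a range check (objective: simpler).

-- ===== PORT A =====
-- the 'for idx, grade_level in enumerate(grade_levels)' loop, with the running index as a parameter
def gradeLoopA (gl_ : Char) (no : Int) (idx : Int) : List Char → Option Int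
  | [] => none
  | gl :: rest => if gl_ == gl then some (idx * 10 + no) else gradeLoopA gl_ no (idx + 1) rest

def str_2_int_4_grade (grade : String) : Option Int :=
  match PySem.Str.pyGet? grade 0 with          -- grade[0]  (IndexError → none, excluded by Pre_)
  | none => none
  | some gl_ =>
    match PySem.Str.pyGet? grade 1 with        -- grade[1]
    | none => none
    | some c1 =>
      match PySem.Int.ofChars? [c1] with       -- int(grade[1])  (ValueError → none, excluded by Pre_)
      | none => none
      | some no => gradeLoopA gl_ no 0 ['A', 'B', 'C', 'D', 'E', 'F']

-- ===== PORT B =====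
def str_2_int_4_grade_alt (grade : String) : Option Int :=
  match PySem.Str.pyGet? grade 0 with          -- ord(grade[0])
  | none => none
  | some c0 =>
    let level : Int := (c0.toNat : Int) - 65   -- ord(grade[0]) - ord('A')
    match PySem.Str.pyGet? grade 1 with
    | none => none
    | some c1 =>
      match PySem.Int.ofChars? [c1] with       -- int(grade[1])
      | none => none
      | some no =>
        if 0 ≤ level ∧ level ≤ 5 then some (level * 10 + no) else none

-- ===== PRECONDITION & SPEC =====
-- Pre_ excludes exactly the inputs where the Python raises: strings shorter than 2
-- (IndexError on the subscripts) and those whose second character is not a decimal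
-- digit (ValueError from int of that character, which on the ASCII domain succeeds
-- exactly on the ten digit characters).
def Pre_str_2_int_4_grade (grade : String) : Prop :=
  2 ≤ grade.toList.length ∧ (grade.toList.getD 1 ' ').isDigit = true
instance (grade : String) : Decidable (Pre_str_2_int_4_grade grade) := by
  unfold Pre_str_2_int_4_grade; infer_instance

def pvWitness_str_2_int_4_grade : String := "B7"

def Spec_str_2_int_4_grade (grade : String) (out : Option Int) : Prop := out = str_2_int_4_grade_alt grade
instance (grade : String) (out : Option Int) : Decidable (Spec_str_2_int_4_grade grade out) := by unfold Spec_str_2_int_4_grade; infer_instance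

-- ===== CLAIM (what is proved, stated in full; the proofs are below) =====
def Claim_equal_str_2_int_4_grade : Prop := ∀ (grade : String), Dom_str_2_int_4_grade grade → Pre_str_2_int_4_grade grade → Spec_str_2_int_4_grade grade (str_2_int_4_grade grade)

-- ===== LEMMAS AND PROOFS =====

-- a digit character is one of the ten literals
theorem digit_char_cases (c : Char) (h : c.isDigit = true) :
    c = '0' ∨ c = '1' ∨ c = '2' ∨ c = '3' ∨ c = '4' ∨
    c = '5' ∨ c = '6' ∨ c = '7' ∨ c = '8' ∨ c = '9' := by
  simp only [Char.isDigit, Char.reduceVal, ge_iff_le, Bool.and_eq_true, decide_eq_true_eq] at h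
  have hb : 48 ≤ c.toNat ∧ c.toNat ≤ 57 := by unfold Char.toNat; exact ⟨h.1, h.2⟩
  have hc : c = Char.ofNat c.toNat := (Char.ofNat_toNat c).symm
  have hn : c.toNat = 48 ∨ c.toNat = 49 ∨ c.toNat = 50 ∨ c.toNat = 51 ∨ c.toNat = 52 ∨
      c.toNat = 53 ∨ c.toNat = 54 ∨ c.toNat = 55 ∨ c.toNat = 56 ∨ c.toNat = 57 := by omega
  rcases hn with h'|h'|h'|h'|h'|h'|h'|h'|h'|h' <;> rw [h'] at hc <;> simp [hc]

-- int(c) for a digit character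
theorem ofChars_digit (c : Char) (h : c.isDigit = true) :
    PySem.Int.ofChars? [c] = some ((c.toNat : Int) - 48) := by
  rcases digit_char_cases c h with h'|h'|h'|h'|h'|h'|h'|h'|h'|h' <;> subst h' <;> decide

-- A's scan over the six letters equals B's closed form
theorem gradeLoopA_closed (c0 : Char) (no : Int) :
    gradeLoopA c0 no 0 ['A', 'B', 'C', 'D', 'E', 'F'] =
      (if 0 ≤ (c0.toNat : Int) - 65 ∧ (c0.toNat : Int) - 65 ≤ 5 then
        some (((c0.toNat : Int) - 65) * 10 + no) else none) := by
  by_cases hA : c0 = 'A'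
  · subst hA; rw [if_pos (by decide)]
    rw [show (('A'.toNat : Nat) : Int) = 65 from by decide]
    norm_num [gradeLoopA]
    try simp
  by_cases hB : c0 = 'B'
  · subst hB; rw [if_pos (by decide)]
    rw [show (('B'.toNat : Nat) : Int) = 66 from by decide]
    norm_num [gradeLoopA]
    try simp
  by_cases hC : c0 = 'C'
  · subst hC; rw [if_pos (by decide)]
    rw [show (('C'.toNat : Nat) : Int) = 67 from by decide]
    norm_num [gradeLoopA]
    try simp
  by_cases hD : c0 = 'D'
  · subst hD; rw [if_pos (by decide)]
    rw [show (('D'.toNat : Nat) : Int) = 68 from by decide]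
    norm_num [gradeLoopA]
    try simp
  by_cases hE : c0 = 'E'
  · subst hE; rw [if_pos (by decide)]
    rw [show (('E'.toNat : Nat) : Int) = 69 from by decide]
    norm_num [gradeLoopA]
    try simp
  by_cases hF : c0 = 'F'
  · subst hF; rw [if_pos (by decide)]
    rw [show (('F'.toNat : Nat) : Int) = 70 from by decide]
    norm_num [gradeLoopA]
    try simp
  have hcond : ¬ (0 ≤ (c0.toNat : Int) - 65 ∧ (c0.toNat : Int) - 65 ≤ 5) := by
    intro ⟨h1, h2⟩
    have hn : c0.toNat = 65 ∨ c0.toNat = 66 ∨ c0.toNat = 67 ∨ c0.toNat = 68 ∨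
        c0.toNat = 69 ∨ c0.toNat = 70 := by omega
    have hc : c0 = Char.ofNat c0.toNat := (Char.ofNat_toNat c0).symm
    rcases hn with h'|h'|h'|h'|h'|h' <;> rw [h'] at hc <;> simp_all
  rw [if_neg hcond]
  simp [gradeLoopA, hA, hB, hC, hD, hE, hF]

-- ===== VERDICT (by name: the statement is the Claim_ definition above) =====
theorem str_2_int_4_grade_spec : Claim_equal_str_2_int_4_grade := by
  intro grade _ hpre
  obtain ⟨hlen, hdig⟩ := hpre
  unfold Spec_str_2_int_4_grade str_2_int_4_grade str_2_int_4_grade_alt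
  match hm : grade.toList with
  | [] => rw [hm] at hlen; simp at hlen
  | [_] => rw [hm] at hlen; simp at hlen
  | c0 :: c1 :: rest =>
    rw [hm] at hdig
    simp only [List.getD, List.getElem?_cons_succ, List.getElem?_cons_zero, Option.getD_some] at hdig
    have h0 : PySem.Str.pyGet? grade 0 = some c0 := by
      simp [PySem.Str.pyGet?, hm, PySem.List.pyGet?_zero_cons]
    have h1 : PySem.Str.pyGet? grade 1 = some c1 := by
      simp [PySem.Str.pyGet?, hm, PySem.List.pyGet?, PySem.List.pyIdx?]
    rw [h0, h1]
    simp only [ofChars_digit c1 hdig, gradeLoopA_closed]
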